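-- pv_equiv track=rewrite | github.com/gopnikgame/telegram-publisher-bot | app/markdown.py | process_quotes
-- ===== SOURCE A (Python) =====
-- def process_quotes(text: str) -> str:
--     """Обрабатывает цитаты в формате Markdown и преобразует их в HTML."""
--     # Обработка цитат (начинаются с > )
--     lines = text.split('\n')
--     result = []
--     in_quote = False
--     quote_lines = []
--
--     for line in lines:
--         if line.strip().startswith('>'):
--             # Начало или продолжение цитаты
--             if not in_quote:
--                 in_quote = True
--             quote_content = line.strip()[1:].strip()  # Убираем '>' и пробелы вначале
--             quote_lines.append(quote_content)
--         else:
--             # Конец цитаты, если была активна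
--             if in_quote:
--                 # Telegram поддерживает только <i> для цитат, не <blockquote>
--                 result.append(f'<i>{" ".join(quote_lines)}</i>')
--                 quote_lines = []
--                 in_quote = False
--             result.append(line)
--
--     # Если цитата не была закрыта
--     if in_quote:
--         result.append(f'<i>{" ".join(quote_lines)}</i>')
--
--     return '\n'.join(result)
-- ===== SOURCE B (Python) =====
-- def process_quotes(text: str) -> str:
--     """Обрабатывает цитаты в формате Markdown и преобразует их в HTML."""
--     def is_quote(line):
--         return line.strip().startswith('>')
--
--     def clean(line):
--         return line.strip()[1:].strip()
--
--     lines = text.split('\n')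
--     out = []
--     i, n = 0, len(lines)
--     while i < n:
--         if is_quote(lines[i]):
--             j = i + 1
--             while j < n and is_quote(lines[j]):
--                 j += 1
--             out.append('<i>' + ' '.join(clean(l) for l in lines[i:j]) + '</i>')
--             i = j
--         else:
--             out.append(lines[i])
--             i += 1
--     return '\n'.join(out)
-- ===== Notes on version B (the rewrite author's own statement) =====
-- stated objective: alternative
-- what changed: Replaced the in_quote/quote_lines state machine with end-of-text flush by a run-grouping scan: each maximal run of quote lines is located with an inner scan and emitted as one <i>...</i> element immediately, non-quote lines pass through.
import Mathlib
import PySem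

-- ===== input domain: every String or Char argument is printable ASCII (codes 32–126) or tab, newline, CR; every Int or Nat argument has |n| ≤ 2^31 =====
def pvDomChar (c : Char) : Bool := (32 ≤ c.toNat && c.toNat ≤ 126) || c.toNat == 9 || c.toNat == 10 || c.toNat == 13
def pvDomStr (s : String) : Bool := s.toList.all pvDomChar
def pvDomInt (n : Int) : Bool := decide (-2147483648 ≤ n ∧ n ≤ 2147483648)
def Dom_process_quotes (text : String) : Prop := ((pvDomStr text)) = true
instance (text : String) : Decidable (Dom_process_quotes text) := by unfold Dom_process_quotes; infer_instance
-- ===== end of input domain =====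

-- B replaces A's in_quote/quote_lines state machine (with its end-of-text flush) by a
-- run-grouping scan that emits each maximal run of quote lines as one <i>…</i> element; alternative, same cost.


-- ===== PORT A =====
-- loop body of A's `for line in lines` (state = (result, in_quote, quote_lines)); exact on code points via PySem.Chars
def pqStepA (st : List (List Char) × Bool × List (List Char)) (line : List Char) :
    List (List Char) × Bool × List (List Char) :=
  let (result, in_quote, quote_lines) := st
  if PySem.Chars.startswith (PySem.Chars.strip line) ['>'] then
    let quote_content := PySem.Chars.strip (PySem.Chars.slice (PySem.Chars.strip line) (some 1) none)
    (result, true, quote_lines ++ [quote_content])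
  else
    if in_quote then
      (result ++ ["<i>".toList ++ PySem.Chars.join [' '] quote_lines ++ "</i>".toList, line], false, [])
    else
      (result ++ [line], in_quote, quote_lines)

def process_quotes (text : String) : String :=
  let lines := PySem.Chars.splitOn text.toList ['\n']
  let st := lines.foldl pqStepA ([], false, [])
  let result :=
    if st.2.1 then st.1 ++ ["<i>".toList ++ PySem.Chars.join [' '] st.2.2 ++ "</i>".toList] else st.1
  String.ofList (PySem.Chars.join ['\n'] result)

-- ===== PORT B =====
def pqIsQuote (line : List Char) : Bool := PySem.Chars.startswith (PySem.Chars.strip line) ['>']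

def pqClean (line : List Char) : List Char :=
  PySem.Chars.strip (PySem.Chars.slice (PySem.Chars.strip line) (some 1) none)

-- run-grouping scan: the inner `while j < n and is_quote(lines[j])` is the takeWhile/dropWhile split
def pqGo : List (List Char) → List (List Char)
  | [] => []
  | l :: ls =>
    if pqIsQuote l then
      ("<i>".toList ++ PySem.Chars.join [' '] ((l :: ls.takeWhile pqIsQuote).map pqClean) ++ "</i>".toList)
        :: pqGo (ls.dropWhile pqIsQuote)
    else
      l :: pqGo ls
  termination_by ls => ls.length
  decreasing_by
  · simpa using Nat.lt_succ_of_le (ls.dropWhile_sublist pqIsQuote).length_le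
  · simp

def process_quotes_alt (text : String) : String :=
  String.ofList (PySem.Chars.join ['\n'] (pqGo (PySem.Chars.splitOn text.toList ['\n'])))

-- ===== PRECONDITION & SPEC =====
def Spec_process_quotes (text : String) (out : String) : Prop := out = process_quotes_alt text
instance (text : String) (out : String) : Decidable (Spec_process_quotes text out) := by unfold Spec_process_quotes; infer_instance

-- ===== CLAIM (what is proved, stated in full; the proofs are below) =====
def Claim_equal_process_quotes : Prop := ∀ (text : String), Dom_process_quotes text → Spec_process_quotes text (process_quotes text)

-- ===== LEMMAS AND PROOFS =====
-- A's end-of-loop flush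
def pqFinishA (st : List (List Char) × Bool × List (List Char)) : List (List Char) :=
  if st.2.1 then st.1 ++ ["<i>".toList ++ PySem.Chars.join [' '] st.2.2 ++ "</i>".toList] else st.1

theorem pqStepA_quote (st : List (List Char) × Bool × List (List Char)) (line : List Char)
    (h : pqIsQuote line = true) :
    pqStepA st line = (st.1, true, st.2.2 ++ [pqClean line]) := by
  obtain ⟨r, b, q⟩ := st
  simp [pqStepA, pqIsQuote, pqClean] at h ⊢
  simp [h]

theorem pqStepA_plain (st : List (List Char) × Bool × List (List Char)) (line : List Char)
    (h : pqIsQuote line = false) :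
    pqStepA st line =
      if st.2.1 then
        (st.1 ++ ["<i>".toList ++ PySem.Chars.join [' '] st.2.2 ++ "</i>".toList, line], false, [])
      else (st.1 ++ [line], st.2.1, st.2.2) := by
  obtain ⟨r, b, q⟩ := st
  simp [pqStepA, pqIsQuote] at h ⊢
  simp [h]

theorem pqMain (ls : List (List Char)) : ∀ (res qs : List (List Char)),
    pqFinishA (ls.foldl pqStepA (res, false, [])) = res ++ pqGo ls ∧
    pqFinishA (ls.foldl pqStepA (res, true, qs))
      = res ++ ("<i>".toList ++ PySem.Chars.join [' ']
            (qs ++ (ls.takeWhile pqIsQuote).map pqClean) ++ "</i>".toList)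
          :: pqGo (ls.dropWhile pqIsQuote) := by
  induction ls with
  | nil => intro res qs; simp [pqFinishA, pqGo]
  | cons l ls ih =>
    intro res qs
    by_cases h : pqIsQuote l = true
    · constructor
      · rw [pqGo, if_pos h, List.foldl_cons, pqStepA_quote _ _ h]
        simpa using (ih res ([] ++ [pqClean l])).2
      · rw [List.foldl_cons, pqStepA_quote _ _ h]
        have := (ih res (qs ++ [pqClean l])).2
        rw [this, List.takeWhile_cons_of_pos h, List.dropWhile_cons_of_pos h]
        simp
    · rw [Bool.not_eq_true] at h
      constructor
      · rw [pqGo, if_neg (by simp [h]), List.foldl_cons, pqStepA_plain _ _ h]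
        simp only [if_neg (by simp : ¬ (false = true))]
        exact ((ih (res ++ [l]) qs).1).trans (by simp)
      · rw [List.foldl_cons, pqStepA_plain _ _ h, if_pos rfl]
        refine ((ih (res ++ ["<i>".toList ++ PySem.Chars.join [' '] qs ++ "</i>".toList, l]) qs).1).trans ?_
        rw [List.takeWhile_cons_of_neg (by simp [h]), List.dropWhile_cons_of_neg (by simp [h])]
        rw [pqGo, if_neg (by simp [h])]
        simp

-- ===== VERDICT (by name: the statement is the Claim_ definition above) =====
theorem process_quotes_spec : Claim_equal_process_quotes := by
  intro text _
  show process_quotes text = process_quotes_alt text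
  unfold process_quotes process_quotes_alt
  have h := (pqMain (PySem.Chars.splitOn text.toList ['\n']) [] []).1
  unfold pqFinishA at h
  simp only [List.nil_append] at h
  simpa using congrArg (fun r => String.ofList (PySem.Chars.join ['\n'] r)) h
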